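-- pv_equiv track=rewrite | github.com/Fenix085/Algorithms-assignment | assignment_1/sorter.py | stalinSort
-- ===== SOURCE A (Python) =====
-- def stalinSort(arr):
--     if len(arr) == 0:
--         return arr
--     purged = [arr[0]]
--     for i in range(1, len(arr)):
--         if arr[i] >= purged[-1]:
--             purged.append(arr[i])
--     return purged
-- ===== SOURCE B (Python) =====
-- def stalinSort(arr):
--     if len(arr) == 0:
--         return arr
--     # prefix max of the strictly-preceding elements (pm[0] = arr[0] so the
--     # first element is always kept)
--     pm = []
--     m = arr[0]
--     for x in arr:
--         pm.append(m)
--         m = m if m >= x else x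
--     return [x for x, p in zip(arr, pm) if x >= p]
-- ===== Notes on version B (the rewrite author's own statement) =====
-- stated objective: alternative
-- what changed: Instead of growing the kept list and comparing each element against its last entry, B first computes the prefix maxima of the preceding elements in one pass and then keeps every element that is >= its prefix maximum.
import Mathlib
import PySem

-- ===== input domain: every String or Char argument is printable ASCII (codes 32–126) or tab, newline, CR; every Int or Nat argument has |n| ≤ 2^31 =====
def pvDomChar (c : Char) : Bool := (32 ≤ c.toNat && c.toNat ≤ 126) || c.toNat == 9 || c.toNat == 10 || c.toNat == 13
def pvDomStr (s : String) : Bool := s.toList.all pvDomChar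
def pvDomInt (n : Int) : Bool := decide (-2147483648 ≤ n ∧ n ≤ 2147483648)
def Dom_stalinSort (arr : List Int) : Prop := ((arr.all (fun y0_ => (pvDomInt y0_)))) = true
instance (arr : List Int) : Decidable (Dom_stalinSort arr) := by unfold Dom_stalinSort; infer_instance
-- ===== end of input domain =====

-- B replaces A's grow-and-compare-with-last loop by a prefix-maximum pass plus a zip/filter pass (alternative decomposition, same cost).


-- ===== PORT A =====
def stalinSort (arr : List Int) : List Int :=
  match arr with
  | [] => arr
  | a :: rest =>
    rest.foldl (fun purged x => if x ≥ purged.getLast! then purged ++ [x] else purged) [a]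

-- ===== PORT B =====
def stalinSort_alt (arr : List Int) : List Int :=
  match arr with
  | [] => arr
  | a :: _ =>
    -- first pass: pm = prefix maxima of the strictly-preceding elements (pm[0] = arr[0])
    let pm := (arr.foldl (fun (acc : List Int × Int) x =>
        (acc.1 ++ [acc.2], if acc.2 ≥ x then acc.2 else x)) ([], a)).1
    -- second pass: keep x iff x ≥ its prefix maximum
    ((arr.zip pm).filter (fun p => p.1 ≥ p.2)).map Prod.fst

-- ===== PRECONDITION & SPEC =====
def Spec_stalinSort (arr : List Int) (out : List Int) : Prop := out = stalinSort_alt arr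
instance (arr : List Int) (out : List Int) : Decidable (Spec_stalinSort arr out) := by unfold Spec_stalinSort; infer_instance

-- ===== CLAIM (what is proved, stated in full; the proofs are below) =====
def Claim_equal_stalinSort : Prop := ∀ (arr : List Int), Dom_stalinSort arr → Spec_stalinSort arr (stalinSort arr)

-- ===== LEMMAS AND PROOFS =====

/-- Reference: keep each element ≥ the running maximum `m`. -/
def pvRef (m : Int) : List Int → List Int
  | [] => []
  | x :: xs => if x ≥ m then x :: pvRef x xs else pvRef m xs

/-- Prefix maxima: the running maximum `m` just before each element. -/
def pvPref (m : Int) : List Int → List Int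
  | [] => []
  | x :: xs => m :: pvPref (if m ≥ x then m else x) xs

theorem pvA_loop (xs : List Int) : ∀ (p : List Int) (m : Int), p ≠ [] → p.getLast! = m →
    xs.foldl (fun purged x => if x ≥ purged.getLast! then purged ++ [x] else purged) p
      = p ++ pvRef m xs := by
  induction xs with
  | nil => intro p m _ _; simp [pvRef]
  | cons x xs ih =>
    intro p m hp hl
    simp only [List.foldl, pvRef, hl]
    by_cases h : x ≥ m
    · simp only [h, if_pos]
      rw [ih (p ++ [x]) x (by simp) (by simp)]
      simp
    · simp only [h, if_false]
      exact ih p m hp hl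

theorem pvB_loop (xs : List Int) : ∀ (acc : List Int) (m : Int),
    (xs.foldl (fun (acc : List Int × Int) x =>
        (acc.1 ++ [acc.2], if acc.2 ≥ x then acc.2 else x)) (acc, m)).1
      = acc ++ pvPref m xs := by
  induction xs with
  | nil => intro acc m; simp [pvPref]
  | cons x xs ih =>
    intro acc m
    simp only [List.foldl, pvPref]
    rw [ih (acc ++ [m]) (if m ≥ x then m else x)]
    simp

theorem pvZip (xs : List Int) : ∀ (m : Int),
    ((xs.zip (pvPref m xs)).filter (fun p => p.1 ≥ p.2)).map Prod.fst = pvRef m xs := by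
  induction xs with
  | nil => intro m; simp [pvPref, pvRef]
  | cons x xs ih =>
    intro m
    simp only [pvPref, pvRef, List.zip_cons_cons, List.filter]
    by_cases h : x ≥ m
    · have hmx : (if m ≥ x then m else x) = x := by omega
      simp [h, hmx, ih]
    · have hmx : (if m ≥ x then m else x) = m := by omega
      simp [h, hmx, ih]

-- ===== VERDICT (by name: the statement is the Claim_ definition above) =====
theorem stalinSort_spec : Claim_equal_stalinSort := by
  intro arr _
  unfold Spec_stalinSort stalinSort stalinSort_alt
  cases arr with
  | nil => rfl
  | cons a rest =>
    simp only []
    rw [pvA_loop rest [a] a (by simp) (by simp [List.getLast!])]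
    rw [pvB_loop]
    simp only [List.nil_append]
    rw [pvZip (a :: rest) a]
    simp [pvRef]
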